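-- pv_equiv track=rewrite | github.com/toroktamas/2016.majus.10_Emelt_szintu_Informatika_Erettsegi | otszaz.py | ar
-- ===== SOURCE A (Python) =====
-- def ar(termek):
--     """ vasarolt - vasarolt termekek szama """
--     teljes_ar = 0
--     for k in set(termek):
--         hany = termek.count(k)
--         if hany == 1:
--             fizetendo = 500
--         elif hany == 2:
--             fizetendo = 500+450
--         elif hany == 3:
--             fizetendo = 500+450+400
--         elif hany > 3:
--             fizetendo = 500+450+400+((hany-3)*400)
--
--         teljes_ar += fizetendo
--
--     return teljes_ar
-- ===== SOURCE B (Python) =====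
-- def ar(termek):
--     """ vasarolt - vasarolt termekek szama """
--     # Single left-to-right pass: price each purchase as it happens, using the
--     # marginal price of the n-th copy of a product (1st: 500, 2nd: 450, later: 400).
--     seen = {}
--     total = 0
--     for x in termek:
--         n = seen.get(x, 0)
--         total += 500 if n == 0 else (450 if n == 1 else 400)
--         seen[x] = n + 1
--     return total
-- ===== Notes on version B (the rewrite author's own statement) =====
-- stated objective: faster
-- what changed: B prices each purchase online in a single left-to-right pass by its marginal cost (500 for the first copy of a product seen so far, 450 for the second, 400 for each later one), instead of A's pass over the distinct products that rescans the list with .count and maps the total count through a branch cascade.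
import Mathlib
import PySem

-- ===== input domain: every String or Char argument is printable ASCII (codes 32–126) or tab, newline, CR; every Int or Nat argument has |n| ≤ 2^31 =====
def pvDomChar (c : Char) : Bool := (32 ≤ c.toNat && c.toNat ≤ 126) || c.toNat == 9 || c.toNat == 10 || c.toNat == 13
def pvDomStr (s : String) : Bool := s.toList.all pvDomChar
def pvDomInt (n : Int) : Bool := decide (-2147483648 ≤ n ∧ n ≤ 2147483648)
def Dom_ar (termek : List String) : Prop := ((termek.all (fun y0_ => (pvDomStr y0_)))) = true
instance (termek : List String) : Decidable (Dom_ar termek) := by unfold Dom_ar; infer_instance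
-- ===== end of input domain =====

-- B prices each purchase online in one pass by its marginal cost (500/450/400 for the
-- 1st/2nd/later copy of a product), replacing A's per-distinct-element count scan
-- and branch cascade (objective: faster).

-- ===== PORT A =====
def ar (termek : List String) : Int :=
  (PySem.Set.ofList termek).foldl (fun teljes_ar k =>
    let hany : Int := (termek.count k : Int)
    let fizetendo : Int :=
      if hany = 1 then 500
      else if hany = 2 then 500 + 450
      else if hany = 3 then 500 + 450 + 400
      else if hany > 3 then 500 + 450 + 400 + ((hany - 3) * 400)
      else 0  -- unreachable: a member of set(termek) has count ≥ 1 (Python would NameError here)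
    teljes_ar + fizetendo) 0

-- ===== PORT B =====
def ar_alt (termek : List String) : Int :=
  (termek.foldl (fun (st : PySem.Dict String Int × Int) x =>
      let n : Int := st.1.getD x 0
      (st.1.insert x (n + 1),
       st.2 + (if n = 0 then 500 else if n = 1 then 450 else 400)))
    (PySem.Dict.empty, 0)).2

-- ===== PRECONDITION & SPEC =====
def Spec_ar (termek : List String) (out : Int) : Prop := out = ar_alt termek
instance (termek : List String) (out : Int) : Decidable (Spec_ar termek out) := by unfold Spec_ar; infer_instance

-- ===== CLAIM (what is proved, stated in full; the proofs are below) =====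
def Claim_equal_ar : Prop := ∀ (termek : List String), Dom_ar termek → Spec_ar termek (ar termek)

-- ===== LEMMAS AND PROOFS =====

-- A's per-distinct-element price of a product bought c times
def fiz (c : Int) : Int :=
  if c = 1 then 500
  else if c = 2 then 500 + 450
  else if c = 3 then 500 + 450 + 400
  else if c > 3 then 500 + 450 + 400 + ((c - 3) * 400)
  else 0

-- B's marginal price of the (n+1)-st copy
def price (n : Int) : Int := if n = 0 then 500 else if n = 1 then 450 else 400

-- the common reference value: total = Σ over distinct products of fiz(count)
def F (L : List String) : Int :=
  ((PySem.Set.ofList L).map (fun k => fiz ((L.count k : Int)))).sum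

lemma fiz_succ (c : Int) (hc : 0 ≤ c) : fiz (c + 1) = fiz c + price c := by
  unfold fiz price
  split_ifs <;> omega

lemma sum_map_change {α : Type} [DecidableEq α] (S : List α) (f g : α → Int) (x : α)
    (hS : S.Nodup) (hx : x ∈ S) (hfg : ∀ k ∈ S, k ≠ x → f k = g k) :
    (S.map f).sum = (S.map g).sum + (f x - g x) := by
  induction S with
  | nil => cases hx
  | cons a t ih =>
    simp only [List.map_cons, List.sum_cons]
    rcases List.mem_cons.mp hx with rfl | hxt
    · have : ∀ k ∈ t, f k = g k := fun k hk =>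
        hfg k (List.mem_cons_of_mem _ hk) (fun h => (List.nodup_cons.mp hS).1 (h ▸ hk))
      rw [List.map_congr_left this]
      ring
    · have hax : a ≠ x := fun h => (List.nodup_cons.mp hS).1 (h ▸ hxt)
      rw [hfg a (List.mem_cons_self ..) hax,
          ih (List.nodup_cons.mp hS).2 hxt
            (fun k hk => hfg k (List.mem_cons_of_mem _ hk))]
      ring

lemma count_ne (M : List String) (x k : String) (hk : k ≠ x) :
    (M ++ [x]).count k = M.count k := by
  have h0 : ([x] : List String).count k = 0 :=
    List.count_eq_zero_of_not_mem (by simp [hk])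
  simp [List.count_append, h0]

lemma count_self (M : List String) (x : String) :
    (M ++ [x]).count x = M.count x + 1 := by
  simp [List.count_append]

lemma F_append (M : List String) (x : String) :
    F (M ++ [x]) = F M + price ((M.count x : Int)) := by
  unfold F
  have hset : PySem.Set.ofList (M ++ [x]) = PySem.Set.add (PySem.Set.ofList M) x := by
    simp [PySem.Set.ofList_eq_foldl, List.foldl_append]
  rw [hset]
  by_cases hx : x ∈ M
  · have hmem : x ∈ PySem.Set.ofList M := (PySem.Set.mem_ofList ..).mpr hx
    have hadd : PySem.Set.add (PySem.Set.ofList M) x = PySem.Set.ofList M := by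
      simp [PySem.Set.add, PySem.Set.contains, PySem.Set.mem_ofList, hx]
    rw [hadd]
    have hchange := sum_map_change (PySem.Set.ofList M)
      (fun k => fiz (((M ++ [x]).count k : Int)))
      (fun k => fiz ((M.count k : Int))) x
      (PySem.Set.nodup_ofList ..) hmem
      (fun k _ hk => by dsimp only; rw [count_ne M x k hk])
    rw [hchange]
    dsimp only
    rw [count_self M x]
    push_cast
    rw [fiz_succ ((M.count x : Int)) (by positivity)]
    ring
  · have hadd : PySem.Set.add (PySem.Set.ofList M) x = PySem.Set.ofList M ++ [x] := by
      simp [PySem.Set.add, PySem.Set.contains, PySem.Set.mem_ofList, hx]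
    rw [hadd, List.map_append, List.sum_append]
    have hsame : ∀ k ∈ PySem.Set.ofList M,
        fiz (((M ++ [x]).count k : Int)) = fiz ((M.count k : Int)) := by
      intro k hk
      have hkx : k ≠ x := fun h => hx (h ▸ (PySem.Set.mem_ofList ..).mp hk)
      rw [count_ne M x k hkx]
    rw [List.map_congr_left hsame]
    have hc0 : M.count x = 0 := List.count_eq_zero.mpr hx
    have hcx : (M ++ [x]).count x = 1 := by rw [count_self M x, hc0]
    rw [List.map_singleton, List.sum_singleton, hcx, hc0]
    simp [fiz, price]

-- B's pair fold computes (counter of the prefix, F of the prefix)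
lemma bfold_eq (L : List String) :
    L.foldl (fun (st : PySem.Dict String Int × Int) x =>
        let n : Int := st.1.getD x 0
        (st.1.insert x (n + 1),
         st.2 + (if n = 0 then 500 else if n = 1 then 450 else 400)))
      (PySem.Dict.empty, 0)
    = (PySem.Dict.counter L, F L) := by
  induction L using List.reverseRecOn with
  | nil => simp [F, PySem.Dict.counter]
  | append_singleton M x ih =>
    rw [List.foldl_append, ih]
    simp only [List.foldl_cons, List.foldl_nil]
    have hget : (PySem.Dict.counter M).getD x 0 = (M.count x : Int) :=
      PySem.Dict.getD_counter ..
    have hdict : (PySem.Dict.counter M).insert x ((PySem.Dict.counter M).getD x 0 + 1)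
        = PySem.Dict.counter (M ++ [x]) := by
      rw [← PySem.Dict.foldl_insert_getD_add_one_eq_counter,
          ← PySem.Dict.foldl_insert_getD_add_one_eq_counter,
          List.foldl_append]
      simp
    have hF := F_append M x
    refine Prod.ext ?_ ?_
    · exact hdict
    · show F M + _ = F (M ++ [x])
      rw [hF, hget]
      unfold price
      rfl

lemma ar_eq_F (L : List String) : ar L = F L := by
  unfold ar F
  have hstep : (fun (teljes_ar : Int) k =>
      let hany : Int := (L.count k : Int)
      let fizetendo : Int :=
        if hany = 1 then 500
        else if hany = 2 then 500 + 450
        else if hany = 3 then 500 + 450 + 400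
        else if hany > 3 then 500 + 450 + 400 + ((hany - 3) * 400)
        else 0
      teljes_ar + fizetendo)
      = (fun (teljes_ar : Int) k => teljes_ar + fiz ((L.count k : Int))) := rfl
  rw [hstep, PySem.List.foldl_add (g := fun k => fiz ((L.count k : Int)))]
  simp

lemma ar_alt_eq_F (L : List String) : ar_alt L = F L := by
  unfold ar_alt
  rw [bfold_eq]

-- ===== VERDICT (by name: the statement is the Claim_ definition above) =====
theorem ar_spec : Claim_equal_ar := by
  intro termek _
  show ar termek = ar_alt termek
  rw [ar_eq_F, ar_alt_eq_F]
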